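-- pv_equiv track=rewrite | github.com/Kizo1312/Python-zadaci | imena_binarno.py | binarno
-- ===== SOURCE A (Python) =====
-- def binarno(lista, cilj):
--     index_od = 0
--     for i in range(len(lista)):
--         if lista[i] == cilj:
--             index_od = i
--
--     lista.sort()
--     count = 0
--     lijevo = 0
--     desno = len(lista) -1
--     while lijevo <= desno:
--         count+=1
--         sredina = (lijevo + desno) //2
--         if lista[sredina] == cilj:
--
--
--             return f"index:{index_od}, koraci:{count}"
--         elif lista[sredina] < cilj:
--
--             lijevo = sredina +1
--         else:
--
--             desno = sredina -1
--     return "nema tog imena"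
-- ===== SOURCE B (Python) =====
-- def binarno(lista, cilj):
--     # last original index of cilj (default 0)
--     index_od = 0
--     for i, name in enumerate(lista):
--         if name == cilj:
--             index_od = i
--     lista.sort()
--
--     # binary search by recursion on a shrinking slice of the sorted list:
--     # the probe of a segment of length L is its element at (L-1)//2, which is
--     # exactly A's midpoint (lo+hi)//2 shifted by the segment's offset.
--     def bs(seg, steps):
--         if not seg:
--             return "nema tog imena"
--         m = (len(seg) - 1) // 2
--         if seg[m] == cilj:
--             return f"index:{index_od}, koraci:{steps}"
--         if seg[m] < cilj:
--             return bs(seg[m + 1:], steps + 1)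
--         return bs(seg[:m], steps + 1)
--
--     return bs(lista, 1)
-- ===== Notes on version B (the rewrite author's own statement) =====
-- stated objective: alternative
-- what changed: The index-loop binary search over (lijevo, desno) bounds is replaced by structural recursion on a shrinking slice of the sorted list (probe at (len(seg)-1)//2, recurse on seg[m+1:] or seg[:m]) with the step count threaded as an accumulator, and the index scan iterates enumerate pairs instead of range indexing.
import Mathlib
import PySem

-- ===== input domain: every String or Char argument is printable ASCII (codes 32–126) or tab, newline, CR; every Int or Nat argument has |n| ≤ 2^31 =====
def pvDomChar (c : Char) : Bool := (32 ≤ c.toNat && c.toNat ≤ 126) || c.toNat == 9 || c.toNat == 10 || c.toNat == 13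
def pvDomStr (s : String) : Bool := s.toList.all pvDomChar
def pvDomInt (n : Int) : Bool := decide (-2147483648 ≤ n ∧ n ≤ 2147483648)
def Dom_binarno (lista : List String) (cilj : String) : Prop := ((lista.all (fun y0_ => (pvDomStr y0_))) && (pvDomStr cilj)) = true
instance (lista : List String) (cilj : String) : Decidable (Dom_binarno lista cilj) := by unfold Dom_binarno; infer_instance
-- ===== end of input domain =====

-- B replaces A's index-bound while loop by structural recursion on a shrinking slice of the
-- sorted list, threading the step count as an accumulator (objective: alternative).
-- A (and B) sort `lista` in place; the equivalence proved here is about the return value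
-- (both perform the same mutation).

-- ===== PORT A =====
-- the while loop of A; indices stay inside [0, len), so pyGetD's default is never read
def binAsearch (lista : List String) (cilj : String) (idx : Int) (lijevo desno count : Int) : String :=
  if _h : lijevo ≤ desno then
    let count' := count + 1
    let sredina := PySem.Int.floordiv (lijevo + desno) 2
    if PySem.List.pyGetD lista sredina "" == cilj then
      "index:" ++ PySem.Int.toStr idx ++ ", koraci:" ++ PySem.Int.toStr count'
    else if PySem.List.pyGetD lista sredina "" < cilj then
      binAsearch lista cilj idx (sredina + 1) desno count'
    else
      binAsearch lista cilj idx lijevo (sredina - 1) count'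
  else "nema tog imena"
  termination_by (desno + 1 - lijevo).toNat
  decreasing_by
  · have h1 : lijevo * 2 ≤ lijevo + desno := by omega
    have h2 : lijevo + desno < (desno + 1) * 2 := by omega
    have := (PySem.Int.le_floordiv_iff_mul_le (a := lijevo + desno) (b := 2) (q := lijevo) (by norm_num)).2 h1
    have := (PySem.Int.floordiv_lt_iff_lt_mul (a := lijevo + desno) (b := 2) (q := desno + 1) (by norm_num)).2 h2
    omega
  · have h1 : lijevo * 2 ≤ lijevo + desno := by omega
    have h2 : lijevo + desno < (desno + 1) * 2 := by omega
    have := (PySem.Int.le_floordiv_iff_mul_le (a := lijevo + desno) (b := 2) (q := lijevo) (by norm_num)).2 h1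
    have := (PySem.Int.floordiv_lt_iff_lt_mul (a := lijevo + desno) (b := 2) (q := desno + 1) (by norm_num)).2 h2
    omega

def binarno (lista : List String) (cilj : String) : String :=
  let index_od := (PySem.List.pyRange 0 (PySem.List.len lista) 1).foldl
    (fun acc i => if PySem.List.pyGetD lista i "" == cilj then i else acc) 0
  let sorted := PySem.List.sorted lista (fun x => x) false
  binAsearch sorted cilj index_od 0 (PySem.List.len sorted - 1) 0

-- ===== PORT B =====
-- the recursive helper bs of Source B: recursion on a slice of the sorted list
def binBseg (cilj : String) (idx : Int) (seg : List String) (steps : Int) : String :=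
  if seg.isEmpty then "nema tog imena"
  else
    let m := PySem.Int.floordiv (PySem.List.len seg - 1) 2
    if PySem.List.pyGetD seg m "" == cilj then
      "index:" ++ PySem.Int.toStr idx ++ ", koraci:" ++ PySem.Int.toStr steps
    else if PySem.List.pyGetD seg m "" < cilj then
      binBseg cilj idx (PySem.List.slice seg (some (m + 1)) none) (steps + 1)
    else
      binBseg cilj idx (PySem.List.slice seg none (some m)) (steps + 1)
  termination_by seg.length
  decreasing_by
  · have hlen : 1 ≤ seg.length := by
      rcases seg with _ | ⟨a, t⟩
      · simp_all
      · simp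
    have hm : PySem.Int.floordiv (PySem.List.len seg - 1) 2 = (((seg.length - 1) / 2 : Nat) : Int) := by
      simp only [PySem.List.len_eq]
      rw [show ((seg.length : Int) - 1) = (((seg.length - 1 : Nat) : Nat) : Int) by omega]
      exact_mod_cast PySem.Int.floordiv_natCast (seg.length - 1) 2
    rw [hm, show ((((seg.length - 1) / 2 : Nat) : Int) + 1) = (((seg.length - 1) / 2 + 1 : Nat) : Int) by push_cast; ring,
      PySem.List.slice_from_natCast]
    simp only [List.length_drop]
    omega
  · have hlen : 1 ≤ seg.length := by
      rcases seg with _ | ⟨a, t⟩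
      · simp_all
      · simp
    have hm : PySem.Int.floordiv (PySem.List.len seg - 1) 2 = (((seg.length - 1) / 2 : Nat) : Int) := by
      simp only [PySem.List.len_eq]
      rw [show ((seg.length : Int) - 1) = (((seg.length - 1 : Nat) : Nat) : Int) by omega]
      exact_mod_cast PySem.Int.floordiv_natCast (seg.length - 1) 2
    rw [hm, PySem.List.slice_to_natCast]
    simp only [List.length_take]
    omega

def binarno_alt (lista : List String) (cilj : String) : String :=
  let index_od := (PySem.List.enumerate lista 0).foldl
    (fun acc p => if p.2 == cilj then p.1 else acc) 0
  let sorted := PySem.List.sorted lista (fun x => x) false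
  binBseg cilj index_od sorted 1

-- ===== PRECONDITION & SPEC =====
def Spec_binarno (lista : List String) (cilj : String) (out : String) : Prop := out = binarno_alt lista cilj
instance (lista : List String) (cilj : String) (out : String) : Decidable (Spec_binarno lista cilj out) := by unfold Spec_binarno; infer_instance

-- ===== CLAIM (what is proved, stated in full; the proofs are below) =====
def Claim_equal_binarno : Prop := ∀ (lista : List String) (cilj : String), Dom_binarno lista cilj → Spec_binarno lista cilj (binarno lista cilj)

-- ===== LEMMAS AND PROOFS =====

theorem index_eq (lista : List String) (cilj : String) :
    (PySem.List.enumerate lista 0).foldl (fun acc p => if p.2 == cilj then p.1 else acc) 0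
    = (PySem.List.pyRange 0 (PySem.List.len lista) 1).foldl
      (fun acc i => if PySem.List.pyGetD lista i "" == cilj then i else acc) 0 := by
  rw [PySem.List.enumerate_eq_map_pyRange (d := ""), List.foldl_map]

theorem search_eq (lista : List String) (cilj : String) (idx : Int) :
    ∀ (n : Nat) (lo hi count : Int), (hi + 1 - lo).toNat = n → 0 ≤ lo → hi < (lista.length : Int) →
      binAsearch lista cilj idx lo hi count
        = binBseg cilj idx ((lista.drop lo.toNat).take (hi + 1 - lo).toNat) (count + 1) := by
  intro n
  induction n using Nat.strong_induction_on with
  | _ n ih =>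
  intro lo hi count hn hlo hhi
  rw [binAsearch, binBseg]
  by_cases h : lo ≤ hi
  · rw [dif_pos h]
    have hseglen : ((lista.drop lo.toNat).take (hi + 1 - lo).toNat).length = (hi + 1 - lo).toNat := by
      simp only [List.length_take, List.length_drop]
      omega
    have hne : ¬ ((lista.drop lo.toNat).take (hi + 1 - lo).toNat).isEmpty = true := by
      rw [List.isEmpty_iff_length_eq_zero, hseglen]; omega
    rw [if_neg hne]
    -- midpoints agree: m (in the segment) = sredina - lo
    have hm : PySem.Int.floordiv (PySem.List.len ((lista.drop lo.toNat).take (hi + 1 - lo).toNat) - 1) 2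
        = PySem.Int.floordiv (lo + hi) 2 - lo := by
      simp only [PySem.List.len_eq, hseglen]
      rw [show (((hi + 1 - lo).toNat : Int) - 1) = hi - lo by omega]
      have : hi - lo = (lo + hi) - lo * 2 := by ring
      rw [this]
      simp only [PySem.Int.floordiv]
      rw [show (lo + hi) - lo * 2 = (lo + hi) + (-lo) * 2 by ring,
        Int.add_mul_fdiv_right _ _ (by norm_num : (2:Int) ≠ 0)]
      ring
    set sredina := PySem.Int.floordiv (lo + hi) 2 with hsred
    have hb1 : lo * 2 ≤ lo + hi := by omega
    have hb2 : lo + hi < (hi + 1) * 2 := by omega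
    have hs1 := (PySem.Int.le_floordiv_iff_mul_le (a := lo + hi) (b := 2) (q := lo) (by norm_num)).2 hb1
    have hs2 := (PySem.Int.floordiv_lt_iff_lt_mul (a := lo + hi) (b := 2) (q := hi + 1) (by norm_num)).2 hb2
    rw [← hsred] at hs1 hs2
    -- both probes are lista[sredina]
    have hget : PySem.List.pyGetD ((lista.drop lo.toNat).take (hi + 1 - lo).toNat) (sredina - lo) ""
        = PySem.List.pyGetD lista sredina "" := by
      have h1 : sredina - lo = (((sredina - lo).toNat : Nat) : Int) := by omega
      have h2 : sredina = ((sredina.toNat : Nat) : Int) := by omega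
      conv_rhs => rw [h2, PySem.List.pyGetD_natCast]
      conv_lhs => rw [h1, PySem.List.pyGetD_natCast]
      rw [List.getD_eq_getElem?_getD, List.getD_eq_getElem?_getD,
        List.getElem?_take, List.getElem?_drop]
      have : (sredina - lo).toNat < (hi + 1 - lo).toNat := by omega
      rw [if_pos this, show lo.toNat + (sredina - lo).toNat = sredina.toNat by omega]
    simp only [hm, hget]
    split_ifs with hc hd
    · rfl
    · -- go right: lo' = sredina + 1
      rw [ih (hi + 1 - (sredina + 1)).toNat (by omega) (sredina + 1) hi (count + 1) rfl (by omega) hhi]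
      congr 1
      rw [show sredina - lo + 1 = (((sredina - lo + 1).toNat : Nat) : Int) by omega,
        PySem.List.slice_from_natCast, List.drop_take, List.drop_drop]
      congr 1
      · omega
      · congr 1
        omega
    · -- go left: hi' = sredina - 1
      rw [ih (sredina - 1 + 1 - lo).toNat (by omega) lo (sredina - 1) (count + 1) rfl hlo (by omega)]
      congr 1
      rw [show sredina - lo = (((sredina - lo).toNat : Nat) : Int) by omega,
        PySem.List.slice_to_natCast, List.take_take]
      congr 1
      omega
  · rw [dif_neg h]
    have : ((lista.drop lo.toNat).take (hi + 1 - lo).toNat).isEmpty = true := by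
      rw [List.isEmpty_iff_length_eq_zero]
      simp only [List.length_take, List.length_drop]
      omega
    rw [if_pos this]

-- ===== VERDICT (by name: the statement is the Claim_ definition above) =====
theorem binarno_spec : Claim_equal_binarno := by
  intro lista cilj _
  unfold Spec_binarno binarno binarno_alt
  rw [index_eq]
  have hlen : PySem.List.len (PySem.List.sorted lista (fun x => x) false)
      = ((PySem.List.sorted lista (fun x => x) false).length : Int) := PySem.List.len_eq _
  rw [search_eq (PySem.List.sorted lista (fun x => x) false) cilj _
      ((PySem.List.len (PySem.List.sorted lista (fun x => x) false) - 1) + 1 - 0).toNat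
      0 (PySem.List.len (PySem.List.sorted lista (fun x => x) false) - 1) 0 rfl le_rfl
      (by rw [hlen]; omega)]
  congr 1
  rw [hlen]
  simp [List.take_of_length_le]
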